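-- pv_equiv track=rewrite | github.com/LorisDematini/rct_rag | PDF_Re/Acronym/Acronyms_etudes.py | version_3
-- ===== SOURCE A (Python) =====
-- def version_3(acronym, words):
--     """
--     Le premier mot avant la parenthèse contient toutes les lettres
--     de l'acronyme dans l'ordre (lettres peuvent être non consécutives)
--     """
--     if not words:
--         return None
--     first_word = words[-1]
--     a_idx = 0
--     for char in first_word.lower():
--         if a_idx < len(acronym) and char == acronym[a_idx].lower():
--             a_idx += 1
--     if a_idx == len(acronym):
--         return [first_word]
--     return None
-- ===== SOURCE B (Python) =====
-- def version_3(acronym, words):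
--     if not words:
--         return None
--     first_word = words[-1]
--     w = first_word.lower()
--     positions = {}
--     for i, ch in enumerate(w):
--         positions.setdefault(ch, []).append(i)
--     prev = -1
--     for c in acronym.lower():
--         idxs = positions.get(c, [])
--         lo, hi = 0, len(idxs)
--         while lo < hi:
--             mid = (lo + hi) // 2
--             if idxs[mid] <= prev:
--                 lo = mid + 1
--             else:
--                 hi = mid
--         if lo == len(idxs):
--             return None
--         prev = idxs[lo]
--     return [first_word]
-- ===== Notes on version B (the rewrite author's own statement) =====
-- stated objective: alternative
-- what changed: Replaces A's single left-to-right scan of the word (carrying an acronym index) with a two-stage algorithm: first build a dict mapping each character of the lowered word to its sorted list of positions, then walk the acronym and advance by binary-searching each character's position list for the first position past the previous match.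
import Mathlib
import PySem

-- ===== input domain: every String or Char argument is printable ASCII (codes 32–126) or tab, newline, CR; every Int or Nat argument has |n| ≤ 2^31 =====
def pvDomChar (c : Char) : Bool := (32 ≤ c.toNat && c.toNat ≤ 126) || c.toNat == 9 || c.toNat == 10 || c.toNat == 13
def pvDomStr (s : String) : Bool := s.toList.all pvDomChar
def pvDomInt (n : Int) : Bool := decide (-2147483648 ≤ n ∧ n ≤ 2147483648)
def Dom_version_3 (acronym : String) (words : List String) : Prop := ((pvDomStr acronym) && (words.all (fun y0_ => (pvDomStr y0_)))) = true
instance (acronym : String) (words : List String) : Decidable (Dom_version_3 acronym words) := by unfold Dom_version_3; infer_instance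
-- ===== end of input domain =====

-- B replaces A's acronym-index scan of the word with a character→positions index plus
-- binary search per acronym character; return values identical (alternative decomposition).
-- ===== PORT A =====
def version_3 (acronym : String) (words : List String) : Option (List String) :=
  if words = [] then none
  else
    let first_word : String := PySem.List.pyGetD words (-1) ""
    let a : List Char := acronym.toList
    let a_idx : Nat :=
      (PySem.Chars.lower first_word.toList).foldl
        (fun a_idx char =>
          if h : a_idx < a.length then
            if char = PySem.Chars.lowerChar a[a_idx] then a_idx + 1 else a_idx
          else a_idx) 0
    if a_idx = a.length then some [first_word] else none

-- ===== PORT B =====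
-- positions.setdefault(ch, []).append(i) over enumerate(w): char → list of its indices
def posOf (w : List Char) : PySem.Dict Char (List Int) :=
  (PySem.List.enumerate w).foldl (fun d p => d.modify p.2 [] (· ++ [p.1])) PySem.Dict.empty

-- the hand-written 'while lo < hi' binary search of Source B ('idxs[mid]' is always in range
-- since lo < hi ≤ len idxs throughout, so getD 0 is exact; the loop halves hi - lo, so
-- fuel = idxs.length bounds the iteration count)
def bsearchB (idxs : List Int) (prev : Int) : Nat → Nat → Nat → Nat
  | 0, lo, _ => lo
  | fuel + 1, lo, hi =>
    if lo < hi then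
      let mid := (lo + hi) / 2
      if idxs.getD mid 0 ≤ prev then bsearchB idxs prev fuel (mid + 1) hi
      else bsearchB idxs prev fuel lo mid
    else lo

-- Source B's 'for c in acronym.lower()' loop with early return None, as a Bool
def walkB (positions : PySem.Dict Char (List Int)) : List Char → Int → Bool
  | [], _ => true
  | c :: cs, prev =>
    let idxs := positions.getD c []
    let lo := bsearchB idxs prev idxs.length 0 idxs.length
    if lo = idxs.length then false
    else walkB positions cs (idxs.getD lo 0)

def version_3_alt (acronym : String) (words : List String) : Option (List String) :=
  match words.getLast? with
  | none => none
  | some first_word =>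
    let w := PySem.Chars.lower first_word.toList
    if walkB (posOf w) (PySem.Chars.lower acronym.toList) (-1) then some [first_word]
    else none

-- ===== PRECONDITION & SPEC =====
def Spec_version_3 (acronym : String) (words : List String) (out : Option (List String)) : Prop := out = version_3_alt acronym words
instance (acronym : String) (words : List String) (out : Option (List String)) : Decidable (Spec_version_3 acronym words out) := by unfold Spec_version_3; infer_instance

-- ===== CLAIM (what is proved, stated in full; the proofs are below) =====
def Claim_equal_version_3 : Prop := ∀ (acronym : String) (words : List String), Dom_version_3 acronym words → Spec_version_3 acronym words (version_3 acronym words)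

-- ===== LEMMAS AND PROOFS =====
-- greedy subsequence check used as the common characterisation of both programs
def consumeAll : List Char → List Char → Bool
  | [], _ => true
  | _ :: _, [] => false
  | c :: cs, h :: t => if h = c then consumeAll cs t else consumeAll (c :: cs) t

-- A's loop computes the greedy check
lemma loopA_eq (nd hay : List Char) (i : Nat) (hi : i ≤ nd.length) :
    (hay.foldl (fun a_idx char =>
        if h : a_idx < nd.length then
          (if char = nd[a_idx] then a_idx + 1 else a_idx)
        else a_idx) i = nd.length)
    ↔ consumeAll (nd.drop i) hay = true := by
  induction hay generalizing i with
  | nil =>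
    simp only [List.foldl_nil]
    rcases Nat.lt_or_eq_of_le hi with hlt | heq
    · rw [List.drop_eq_getElem_cons hlt]
      simp [consumeAll, Nat.ne_of_lt hlt]
    · simp [heq, consumeAll]
  | cons h t ih =>
    simp only [List.foldl_cons]
    by_cases hlt : i < nd.length
    · rw [List.drop_eq_getElem_cons hlt]
      by_cases hc : h = nd[i]
      · simp only [consumeAll, hlt, hc, if_pos, dif_pos]
        exact ih (i + 1) hlt
      · have : (if hh : i < nd.length then (if h = nd[i] then i + 1 else i) else i) = i := by
          simp [hlt, hc]
        rw [this, ih i hi, consumeAll, if_neg hc, List.drop_eq_getElem_cons hlt]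
    · have heq : i = nd.length := Nat.le_antisymm hi (Nat.le_of_not_lt hlt)
      have : (if hh : i < nd.length then (if h = nd[i] then i + 1 else i) else i) = i := by
        simp [hlt]
      rw [this, ih i hi, heq, List.drop_length]
      simp [consumeAll]

lemma loopA_lower (acronym : String) (hay : List Char) :
    (hay.foldl (fun a_idx char =>
        if h : a_idx < acronym.toList.length then
          (if char = PySem.Chars.lowerChar acronym.toList[a_idx] then a_idx + 1 else a_idx)
        else a_idx) 0 = acronym.toList.length)
    ↔ consumeAll (PySem.Chars.lower acronym.toList) hay = true := by
  have hfun : (fun (a_idx : Nat) (char : Char) =>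
        if h : a_idx < acronym.toList.length then
          (if char = PySem.Chars.lowerChar acronym.toList[a_idx] then a_idx + 1 else a_idx)
        else a_idx)
      = (fun (a_idx : Nat) (char : Char) =>
        if h : a_idx < (PySem.Chars.lower acronym.toList).length then
          (if char = (PySem.Chars.lower acronym.toList)[a_idx] then a_idx + 1 else a_idx)
        else a_idx) := by
    funext a_idx char
    simp [PySem.Chars.lower]
  have hlen : acronym.toList.length = (PySem.Chars.lower acronym.toList).length := by
    simp [PySem.Chars.lower]
  rw [hfun, hlen, loopA_eq _ _ 0 (Nat.zero_le _), List.drop_zero]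

-- the occurrence list of c in w (as built by posOf)
def occ (c : Char) (w : List Char) : List Int :=
  ((PySem.List.enumerate w).filter (fun p => p.2 == c)).map (·.1)

lemma posOf_getD (w : List Char) (c : Char) :
    (posOf w).getD c [] = occ c w := by
  unfold posOf occ
  have hmap : (PySem.List.enumerate w).foldl (fun d p => d.modify p.2 [] (· ++ [p.1])) PySem.Dict.empty
      = ((PySem.List.enumerate w).map (fun p => (p.2, p.1))).foldl
          (fun d p => d.modify p.1 [] (· ++ [p.2])) PySem.Dict.empty := by
    rw [List.foldl_map]
  rw [hmap, PySem.Dict.getD_foldl_modify_append, PySem.Dict.getD_empty]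
  rw [List.filter_map]
  simp only [List.nil_append, List.map_map]
  rfl

lemma occ_pairwise (c : Char) (w : List Char) : (occ c w).Pairwise (· < ·) := by
  unfold occ
  exact List.Pairwise.map _ (fun a b h => h)
    ((PySem.List.pairwise_lt_enumerate w 0).filter _)

lemma mem_occ (c : Char) (w : List Char) (x : Int) :
    x ∈ occ c w ↔ ∃ (k : Nat) (hk : k < w.length), x = (k : Int) ∧ w[k] = c := by
  unfold occ
  simp only [List.mem_map, List.mem_filter, PySem.List.mem_enumerate_iff]
  constructor
  · rintro ⟨p, ⟨⟨k, hk, rfl⟩, hpc⟩, rfl⟩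
    exact ⟨k, hk, by simp, by simpa using hpc⟩
  · rintro ⟨k, hk, rfl, hc⟩
    exact ⟨((k : Int), w[k]), ⟨⟨k, hk, by simp⟩, by simpa using hc⟩, rfl⟩

-- binary-search spec: assuming the invariants at (lo, hi), they hold at the result
lemma bsearchB_spec (idxs : List Int) (prev : Int)
    (hs : idxs.Pairwise (· < ·)) :
    ∀ fuel lo hi, hi - lo ≤ fuel → lo ≤ hi → hi ≤ idxs.length →
    (∀ j (hj : j < idxs.length), j < lo → idxs[j] ≤ prev) →
    (∀ j (hj : j < idxs.length), hi ≤ j → prev < idxs[j]) →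
    bsearchB idxs prev fuel lo hi ≤ idxs.length ∧
    (∀ j (hj : j < idxs.length), j < bsearchB idxs prev fuel lo hi → idxs[j] ≤ prev) ∧
    (∀ j (hj : j < idxs.length), bsearchB idxs prev fuel lo hi ≤ j → prev < idxs[j]) := by
  have hmono : ∀ i j (hi : i < idxs.length) (hj : j < idxs.length), i ≤ j → idxs[i] ≤ idxs[j] := by
    intro i j hi hj hij
    rcases Nat.lt_or_eq_of_le hij with h | h
    · exact le_of_lt (List.pairwise_iff_getElem.mp hs i j hi hj h)
    · subst h; exact le_refl _
  intro fuel
  induction fuel with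
  | zero =>
    intro lo hi hfuel hlohi hhilen hbelow habove
    have : lo = hi := by omega
    rw [bsearchB]
    exact ⟨by omega, hbelow, fun j hj hjge => habove j hj (by omega)⟩
  | succ fuel ih =>
    intro lo hi hfuel hlohi hhilen hbelow habove
    rw [bsearchB]
    by_cases hlt : lo < hi
    · rw [if_pos hlt]
      have hmidlt : (lo + hi) / 2 < idxs.length := by omega
      by_cases hle : idxs.getD ((lo + hi) / 2) 0 ≤ prev
      · rw [if_pos hle]
        rw [List.getD_eq_getElem idxs 0 hmidlt] at hle
        refine ih ((lo + hi) / 2 + 1) hi (by omega) (by omega) hhilen ?_ habove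
        intro j hj hjmid
        exact le_trans (hmono j ((lo + hi) / 2) hj hmidlt (by omega)) hle
      · rw [if_neg hle]
        rw [List.getD_eq_getElem idxs 0 hmidlt] at hle
        rw [not_le] at hle
        refine ih lo ((lo + hi) / 2) (by omega) (by omega) (by omega) hbelow ?_
        intro j hj hjmid
        exact lt_of_lt_of_le hle (hmono ((lo + hi) / 2) j hmidlt hj hjmid)
    · rw [if_neg hlt]
      exact ⟨by omega, hbelow, fun j hj hjge => habove j hj (by omega)⟩

lemma consumeAll_not_mem (c : Char) (cs t : List Char) (h : c ∉ t) :
    consumeAll (c :: cs) t = false := by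
  induction t with
  | nil => rfl
  | cons x xs ih =>
    rw [consumeAll, if_neg (by simp at h; exact fun hx => h.1 hx.symm)]
    exact ih (by simp at h; exact h.2)

lemma consumeAll_first (c : Char) (cs : List Char) :
    ∀ (t : List Char) (m : Nat) (hm : m < t.length), t[m] = c →
    (∀ j (hj : j < t.length), j < m → t[j] ≠ c) →
    consumeAll (c :: cs) t = consumeAll cs (t.drop (m + 1)) := by
  intro t
  induction t with
  | nil => intro m hm; exact absurd hm (by simp)
  | cons x xs ih =>
    intro m hm hc hfirst
    cases m with
    | zero =>
      simp only [List.getElem_cons_zero] at hc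
      rw [consumeAll, if_pos hc, List.drop_succ_cons, List.drop_zero]
    | succ n =>
      have hx : x ≠ c := by
        have := hfirst 0 (by simp) (by omega)
        simpa using this
      rw [consumeAll, if_neg (fun h => hx h)]
      rw [List.drop_succ_cons]
      exact ih n (by simpa using hm) (by simpa using hc)
        (fun j hj hjn => by
          have := hfirst (j + 1) (by simpa using Nat.succ_lt_succ hj) (by omega)
          simpa using this)

-- main walk correspondence: B's indexed walk = greedy scan of the suffix
lemma walkB_eq (w : List Char) (acr : List Char) :
    ∀ (prev : Int), -1 ≤ prev →
    walkB (posOf w) acr prev = consumeAll acr (w.drop (prev + 1).toNat) := by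
  induction acr with
  | nil => intro prev _; simp [walkB, consumeAll]
  | cons c cs ih =>
    intro prev hprev
    rw [walkB]
    simp only [posOf_getD]
    set O := occ c w with hO
    have hs := occ_pairwise c w
    obtain ⟨hrle, hbelow, habove⟩ :=
      bsearchB_spec O prev hs O.length 0 O.length (by omega) (Nat.zero_le _) (le_refl _)
        (fun j hj hj0 => absurd hj0 (Nat.not_lt_zero j))
        (fun j hj hjge => absurd hj (Nat.not_lt.mpr hjge))
    set r := bsearchB O prev O.length 0 O.length with hr
    by_cases hrlen : r = O.length
    · rw [if_pos hrlen]
      have hnot : c ∉ w.drop (prev + 1).toNat := by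
        intro hmem
        obtain ⟨i, hi, hieq⟩ := List.mem_iff_getElem.mp hmem
        rw [List.getElem_drop] at hieq
        have hk : (prev + 1).toNat + i < w.length := by
          rw [List.length_drop] at hi
          omega
        have hx : ((((prev + 1).toNat + i : Nat)) : Int) ∈ O := by
          rw [hO, mem_occ]
          exact ⟨(prev + 1).toNat + i, hk, rfl, hieq⟩
        obtain ⟨j, hj, hjx⟩ := List.mem_iff_getElem.mp hx
        have := hbelow j hj (by omega)
        rw [hjx] at this
        have h1 : (prev + 1).toNat = prev + 1 := by omega
        push_cast at this
        omega
      rw [consumeAll_not_mem c cs _ hnot]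
    · rw [if_neg hrlen]
      have hrlt : r < O.length := Nat.lt_of_le_of_ne (hrle) hrlen
      have hp : O.getD r 0 = O[r] := List.getD_eq_getElem O 0 hrlt
      obtain ⟨k, hk, hkeq, hkc⟩ := (mem_occ c w O[r]).mp (List.getElem_mem hrlt)
      have hprevlt : prev < (k : Int) := by
        have := habove r hrlt (le_refl r)
        rw [hkeq] at this; exact this
      have hkge : (prev + 1).toNat ≤ k := by omega
      have htlen : (w.drop (prev + 1).toNat).length = w.length - (prev + 1).toNat := by
        rw [List.length_drop]
      have hmt : k - (prev + 1).toNat < (w.drop (prev + 1).toNat).length := by omega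
      have htm : (w.drop (prev + 1).toNat)[k - (prev + 1).toNat]'hmt = c := by
        rw [List.getElem_drop]
        simp only [show (prev + 1).toNat + (k - (prev + 1).toNat) = k from by omega]
        exact hkc
      have hfirst : ∀ j (hj : j < (w.drop (prev + 1).toNat).length),
          j < k - (prev + 1).toNat → (w.drop (prev + 1).toNat)[j] ≠ c := by
        intro j hj hjm heq
        rw [List.getElem_drop] at heq
        have hqlen : (prev + 1).toNat + j < w.length := by omega
        have hqk : (prev + 1).toNat + j < k := by omega
        have hqmem : (((prev + 1).toNat + j : Nat) : Int) ∈ O := by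
          rw [hO, mem_occ]; exact ⟨(prev + 1).toNat + j, hqlen, rfl, heq⟩
        obtain ⟨j', hj', hj'x⟩ := List.mem_iff_getElem.mp hqmem
        by_cases hj'r : j' < r
        · have hle := hbelow j' hj' hj'r
          rw [hj'x] at hle
          omega
        · have hle : O[r] ≤ O[j'] := by
            rcases Nat.lt_or_eq_of_le (Nat.le_of_not_lt hj'r) with h | h
            · exact le_of_lt (List.pairwise_iff_getElem.mp hs r j' hrlt hj' h)
            · subst h; exact le_refl _
          rw [hj'x, hkeq] at hle
          omega
      rw [consumeAll_first c cs (w.drop (prev + 1).toNat) (k - (prev + 1).toNat) hmt htm hfirst]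
      have hdrop : (w.drop (prev + 1).toNat).drop (k - (prev + 1).toNat + 1)
          = w.drop ((O[r] + 1).toNat) := by
        rw [List.drop_drop, hkeq]
        congr 1
        omega
      rw [hdrop]
      have hOr0 : (0:Int) ≤ O[r] := by rw [hkeq]; exact Int.natCast_nonneg k
      rw [hp]
      exact ih O[r] (by omega)

-- ===== VERDICT (by name: the statement is the Claim_ definition above) =====
theorem version_3_spec : Claim_equal_version_3 := by
  intro acronym words _
  unfold Spec_version_3 version_3 version_3_alt
  cases words with
  | nil => simp
  | cons w ws =>
    have hne : w :: ws ≠ [] := by simp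
    rw [List.getLast?_eq_some_getLast hne]
    simp only [if_neg hne, PySem.List.pyGetD_neg_one (w :: ws) "" hne]
    set fw := (w :: ws).getLast hne
    have hwalk : walkB (posOf (PySem.Chars.lower fw.toList)) (PySem.Chars.lower acronym.toList) (-1)
        = consumeAll (PySem.Chars.lower acronym.toList) (PySem.Chars.lower fw.toList) := by
      rw [walkB_eq _ _ (-1) (le_refl _)]
      norm_num
    by_cases hc : consumeAll (PySem.Chars.lower acronym.toList) (PySem.Chars.lower fw.toList) = true
    · rw [if_pos ((loopA_lower acronym _).mpr hc), hwalk, if_pos hc]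
    · rw [if_neg (fun hh => hc ((loopA_lower acronym _).mp hh)), hwalk, if_neg hc]
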